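-- pv_equiv track=rewrite | github.com/ernanhughes/stephanie | stephanie/agents/gap.py | _col_for_diag
-- ===== SOURCE A (Python) =====
-- def _col_for_diag(names: list[str], model: str, key_parts: tuple[str, ...]) -> int | None:
--     """
--     Find diagnostic column like 'tiny.reasoning.attr.ood_hat' or 'tiny.uncertainty'.
--     Matches if all key_parts appear in the column name (in order).
--     """
--     def has_parts(s: str) -> bool:
--         pos = 0
--         for kp in key_parts:
--             j = s.find(kp, pos)
--             if j < 0: return False
--             pos = j + len(kp)
--         return True
--     for i, n in enumerate(names):
--         if n.startswith(f"{model}.") and has_parts(n):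
--             return i
--     return None
-- ===== SOURCE B (Python) =====
-- def _col_for_diag(names: list[str], model: str, key_parts: tuple[str, ...]) -> int | None:
--     """Backtracking existential check instead of A's greedy find-cursor:
--     parts occur in order iff some occurrence of the first part leaves a
--     suffix in which the rest occur in order (recursion on the parts)."""
--     def matches(s: str, parts) -> bool:
--         if not parts:
--             return True
--         p, rest = parts[0], parts[1:]
--         return any(s[j:j + len(p)] == p and matches(s[j + len(p):], rest)
--                    for j in range(len(s) - len(p) + 1))
--     prefix = model + "."
--     return next((i for i, n in enumerate(names)
--                  if n.startswith(prefix) and matches(n, tuple(key_parts))),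
--                 None)
-- ===== Notes on version B (the rewrite author's own statement) =====
-- stated objective: alternative
-- what changed: Replaces the greedy left-to-right find-cursor subsequence test by a recursive backtracking matcher (for the head part, try every occurrence position and recurse on the remaining suffix), and the explicit indexed for-loop by next() over an enumerate generator.
import Mathlib
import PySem

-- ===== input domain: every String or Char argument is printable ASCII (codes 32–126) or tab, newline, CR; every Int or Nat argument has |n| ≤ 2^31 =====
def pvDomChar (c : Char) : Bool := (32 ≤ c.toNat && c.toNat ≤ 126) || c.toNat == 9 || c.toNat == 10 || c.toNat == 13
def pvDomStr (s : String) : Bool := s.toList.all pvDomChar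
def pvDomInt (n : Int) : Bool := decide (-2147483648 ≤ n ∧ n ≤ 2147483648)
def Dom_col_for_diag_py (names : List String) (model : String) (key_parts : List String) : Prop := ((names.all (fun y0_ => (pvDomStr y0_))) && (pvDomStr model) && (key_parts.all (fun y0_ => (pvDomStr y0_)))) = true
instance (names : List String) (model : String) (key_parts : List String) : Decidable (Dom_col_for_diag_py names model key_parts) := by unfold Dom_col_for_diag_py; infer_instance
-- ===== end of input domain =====

-- B replaces A's greedy find-cursor subsequence test by a recursive backtracking
-- matcher and the indexed loop by find-first over enumerate (objective: alternative).

-- ===== PORT A =====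
-- has_parts: greedy cursor via s.find(kp, pos)
def hasPartsA (s : String) : List String → Int → Bool
  | [], _ => true
  | kp :: rest, pos =>
    let j := PySem.Str.findFrom s kp pos none
    if j < 0 then false
    else hasPartsA s rest (j + PySem.Str.len kp)

def colLoopA (model : String) (key_parts : List String) : List String → Int → Option Int
  | [], _ => none
  | n :: rest, i =>
    if PySem.Str.startswith n (model ++ ".") && hasPartsA n key_parts 0
    then some i else colLoopA model key_parts rest (i + 1)

def col_for_diag_py (names : List String) (model : String) (key_parts : List String) : Option Int :=
  colLoopA model key_parts names 0

-- ===== PORT B =====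
-- matches: for the head part try every slice position s[j:j+len p] (= (drop j).take |p|) and recurse
def matchesB : List String → List Char → Bool
  | [], _ => true
  | p :: rest, s =>
    (List.range (s.length - p.toList.length + 1)).any fun j =>
      ((s.drop j).take p.toList.length == p.toList) && matchesB rest (s.drop (j + p.toList.length))

def col_for_diag_py_alt (names : List String) (model : String) (key_parts : List String) : Option Int :=
  ((PySem.List.enumerate names 0).find? (fun q =>
      PySem.Str.startswith q.2 (model ++ ".") && matchesB key_parts q.2.toList)).map (·.1)

-- ===== PRECONDITION & SPEC =====
def Spec_col_for_diag_py (names : List String) (model : String) (key_parts : List String) (out : Option Int) : Prop := out = col_for_diag_py_alt names model key_parts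
instance (names : List String) (model : String) (key_parts : List String) (out : Option Int) : Decidable (Spec_col_for_diag_py names model key_parts out) := by unfold Spec_col_for_diag_py; infer_instance

-- ===== CLAIM (what is proved, stated in full; the proofs are below) =====
def Claim_equal_col_for_diag_py : Prop := ∀ (names : List String) (model : String) (key_parts : List String), Dom_col_for_diag_py names model key_parts → Spec_col_for_diag_py names model key_parts (col_for_diag_py names model key_parts)

-- ===== LEMMAS AND PROOFS =====

lemma matchesB_cons_iff (p : String) (rest : List String) (s : List Char) :
    matchesB (p :: rest) s = true ↔
      ∃ j, p.toList <+: s.drop j ∧ matchesB rest (s.drop (j + p.toList.length)) = true := by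
  simp only [matchesB, List.any_eq_true, List.mem_range, Bool.and_eq_true, beq_iff_eq]
  constructor
  · rintro ⟨j, _, htake, hrest⟩
    exact ⟨j, List.prefix_iff_eq_take.mpr htake.symm, hrest⟩
  · rintro ⟨j, hpre, hrest⟩
    by_cases hj : j ≤ s.length
    · have hlen : p.toList.length ≤ (s.drop j).length := hpre.length_le
      rw [List.length_drop] at hlen
      exact ⟨j, by omega, (List.prefix_iff_eq_take.mp hpre).symm, hrest⟩
    · have hnil : s.drop j = [] := List.drop_eq_nil_of_le (by omega)
      have hp : p.toList = [] := List.prefix_nil.mp (hnil ▸ hpre)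
      refine ⟨s.length, by simp [hp], by simp [hp], ?_⟩
      have : s.drop (s.length + p.toList.length) = [] := List.drop_eq_nil_of_le (by omega)
      rw [this]
      simpa [hp, hnil] using hrest

lemma matchesB_mono (parts : List String) (s : List Char) (d : Nat)
    (h : matchesB parts (s.drop d) = true) : matchesB parts s = true := by
  cases parts with
  | nil => simp [matchesB]
  | cons p rest =>
    rw [matchesB_cons_iff] at h ⊢
    obtain ⟨j, hpre, hrest⟩ := h
    refine ⟨d + j, ?_, ?_⟩
    · simpa [List.drop_drop, Nat.add_comm] using hpre
    · have : (s.drop d).drop (j + p.toList.length) = s.drop (d + j + p.toList.length) := by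
        rw [List.drop_drop]; ring_nf
      rwa [this] at hrest

lemma greedy_eq (s : String) (parts : List String) (k : Nat) (hk : k ≤ s.toList.length) :
    hasPartsA s parts (k : Int) = matchesB parts (s.toList.drop k) := by
  induction parts generalizing k with
  | nil => simp [hasPartsA, matchesB]
  | cons kp rest ih =>
    set t := s.toList with ht
    simp only [hasPartsA, PySem.Str.findFrom_eq, ← ht]
    rw [PySem.Chars.findFrom_natCast t kp.toList k hk]
    by_cases hneg : PySem.Chars.find (t.drop k) kp.toList = -1
    · rw [if_pos hneg]
      rw [if_pos (by norm_num : (-1:Int) < 0)]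
      have hno : ¬ kp.toList <:+: t.drop k := (PySem.Chars.find_eq_neg_one_iff _ _).mp hneg
      symm
      rw [Bool.eq_false_iff]  -- goal: matchesB (kp::rest) (t.drop k) ≠ true
      intro hmt
      obtain ⟨j, hpre, _⟩ := (matchesB_cons_iff _ _ _).mp hmt
      exact hno ((PySem.Chars.isIn_iff_infix _ _).mp
        ((PySem.Chars.exists_prefix_drop_iff_isIn _ _).mp ⟨j, hpre⟩))
    · rw [if_neg hneg]
      set f := PySem.Chars.find (t.drop k) kp.toList with hf
      have hf0 : 0 ≤ f := by have := PySem.Chars.neg_one_le_find (t.drop k) kp.toList; omega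
      have hspec := PySem.Chars.find_spec (sub := kp.toList) (s := t.drop k) hf0
      set m := f.toNat with hm
      set L := kp.toList.length with hL
      have hfm : f = (m : Int) := (Int.toNat_of_nonneg hf0).symm
      have hmL : m + L ≤ t.length - k := by
        have h1 := hspec.1.length_le
        simp only [List.length_drop] at h1
        have h2 : f ≤ ((t.drop k).length : Int) := PySem.Chars.find_le_length _ _
        simp only [List.length_drop] at h2
        omega
      have hnotlt : ¬ ((k : Int) + f < 0) := by omega
      rw [if_neg hnotlt]
      have hcast : (k : Int) + f + PySem.Str.len kp = ((k + m + L : Nat) : Int) := by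
        rw [PySem.Str.len_eq, hfm, ← hL]
        push_cast
        ring
      rw [hcast, ih (k + m + L) (by omega)]
      rw [Bool.eq_iff_iff]
      constructor
      · intro hrest
        rw [matchesB_cons_iff]
        refine ⟨m, hspec.1, ?_⟩
        have : (t.drop k).drop (m + L) = t.drop (k + m + L) := by
          rw [List.drop_drop]; ring_nf
        rw [this]; exact hrest
      · intro hmt
        obtain ⟨j, hpre, hrest⟩ := (matchesB_cons_iff _ _ _).mp hmt
        have hmj : m ≤ j := by
          by_contra hlt
          exact (hspec.2 j (by omega)) hpre
        have heq : (t.drop k).drop (j + L) = (t.drop (k + m + L)).drop (j - m) := by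
          rw [List.drop_drop, List.drop_drop]
          congr 1
          omega
        rw [heq] at hrest
        exact matchesB_mono rest _ _ hrest

lemma loop_eq (model : String) (key_parts : List String) (names : List String) (i : Int) :
    colLoopA model key_parts names i =
      ((PySem.List.enumerate names i).find? (fun q =>
        PySem.Str.startswith q.2 (model ++ ".") && matchesB key_parts q.2.toList)).map (·.1) := by
  induction names generalizing i with
  | nil => simp [colLoopA, PySem.List.enumerate_nil]
  | cons n rest ih =>
    have h0 : hasPartsA n key_parts 0 = matchesB key_parts n.toList := by
      have := greedy_eq n key_parts 0 (by omega)
      simpa using this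
    rw [PySem.List.enumerate_cons]
    simp only [colLoopA, List.find?_cons, h0]
    cases hc : (PySem.Str.startswith n (model ++ ".") && matchesB key_parts n.toList) with
    | true =>
      rw [if_pos rfl]
      rfl
    | false =>
      rw [if_neg (by decide)]
      exact ih (i + 1)

-- ===== VERDICT (by name: the statement is the Claim_ definition above) =====
theorem col_for_diag_py_spec : Claim_equal_col_for_diag_py := by
  intro names model key_parts _
  unfold Spec_col_for_diag_py col_for_diag_py col_for_diag_py_alt
  exact loop_eq model key_parts names 0
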